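-- pv_equiv track=rewrite | github.com/Artemis-Holdings/TheSub | main.py | return_mask_normalized
-- ===== SOURCE A (Python) =====
-- def return_mask_normalized(input_mask):
--     if '.' in input_mask:
--         mask_given = [int(i) for i in input_mask.split('.')]
--         return mask_given
--     else:
--         cidr = input_mask.replace('/', '')
--         mask_from_cidr = find_mask(cidr)
--         mask_found = mask_from_cidr
--         return mask_found
--
-- def find_mask(c):  # Create the sub-net mask by using the CIDR. Only called if CIDR is provided by user.
--     array_mask = []
--     for i in range(0, 4):
--         array_mask.append(i)
--     c = int(c)
--     if c < 8:
--         w = 32 - (c + 24)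
--         array_mask[0] = 256 - 2 ** w
--         array_mask[1] = 0
--         array_mask[2] = 0
--         array_mask[3] = 0
--
--     else:
--         if c < 16:
--             x = 32 - (c + 16)
--             array_mask[0] = 255
--             array_mask[1] = 256 - (2 ** x)
--             array_mask[2] = 0
--             array_mask[3] = 0
--         else:
--             if c < 24:
--                 y = 32 - (c + 8)
--                 array_mask[0] = 255
--                 array_mask[1] = 255
--                 array_mask[2] = 256 - (2 ** y)
--                 array_mask[3] = 0
--             else:
--                 z = 32 - c
--                 array_mask[0] = 255
--                 array_mask[1] = 255
--                 array_mask[2] = 255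
--                 array_mask[3] = 256 - (2 ** z)
--     return array_mask
-- ===== SOURCE B (Python) =====
-- def return_mask_normalized(input_mask):
--     if '.' in input_mask:
--         return [int(i) for i in input_mask.split('.')]
--     c = int(input_mask.replace('/', ''))
--     idx = max(0, min(c // 8, 3))
--     return [255] * idx + [256 - 2 ** (8 - (c - 8 * idx))] + [0] * (3 - idx)
-- ===== Notes on version B (the rewrite author's own statement) =====
-- stated objective: simpler
-- what changed: replaces find_mask's 4-way nested if/else (which builds a placeholder list and overwrites all four slots per branch) with one uniform construction: the octet index idx = clamp(c//8, 0, 3) and the list [255]*idx + [256 - 2**(8-(c-8*idx))] + [0]*(3-idx); the '.' branch is unchanged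
-- outside the precondition, e.g. on return_mask_normalized('/33'): A returns [255, 255, 255, 255.5], B returns [255, 255, 255, 255.5]
import Mathlib
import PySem

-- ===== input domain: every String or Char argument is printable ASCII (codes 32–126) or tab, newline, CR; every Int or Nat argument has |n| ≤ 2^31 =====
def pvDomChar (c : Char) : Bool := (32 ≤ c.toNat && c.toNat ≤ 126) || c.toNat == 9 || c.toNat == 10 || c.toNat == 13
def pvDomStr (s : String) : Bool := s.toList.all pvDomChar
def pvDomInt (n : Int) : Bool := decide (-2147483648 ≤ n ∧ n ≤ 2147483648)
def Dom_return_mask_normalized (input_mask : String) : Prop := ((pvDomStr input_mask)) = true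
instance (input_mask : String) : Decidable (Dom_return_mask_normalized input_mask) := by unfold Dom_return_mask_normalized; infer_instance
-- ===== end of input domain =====

-- B replaces find_mask's 4-way nested if/else by one uniform octet construction
-- (idx = clamp(c//8, 0, 3)); return values proved equal on Pre_; no side effects.


-- ===== PORT A =====
-- 2 ** w, exact for 0 ≤ w (Pre_ guarantees this wherever a port reaches it;
-- for w < 0 Python yields a float, excluded by Pre_)
def pvPow2 (w : Int) : Int := 2 ^ w.toNat

def find_mask (c : String) : List Int :=
  -- array_mask = []; for i in range(0, 4): array_mask.append(i)
  let array_mask : List Int := (PySem.List.pyRange 0 4 1).foldl (fun acc i => acc ++ [i]) []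
  match PySem.Int.ofStr? c with  -- c = int(c); none = ValueError, excluded by Pre_
  | none => []
  | some c =>
    if c < 8 then
      let w := 32 - (c + 24)
      (((array_mask.set 0 (256 - pvPow2 w)).set 1 0).set 2 0).set 3 0
    else if c < 16 then
      let x := 32 - (c + 16)
      (((array_mask.set 0 255).set 1 (256 - pvPow2 x)).set 2 0).set 3 0
    else if c < 24 then
      let y := 32 - (c + 8)
      (((array_mask.set 0 255).set 1 255).set 2 (256 - pvPow2 y)).set 3 0
    else
      let z := 32 - c
      (((array_mask.set 0 255).set 1 255).set 2 255).set 3 (256 - pvPow2 z)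

def return_mask_normalized (input_mask : String) : List Int :=
  if PySem.Str.isIn "." input_mask then
    -- [int(i) for i in input_mask.split('.')]; getD 0 is unreached under Pre_ (every part parses)
    (((PySem.Str.split? input_mask ".").getD [])).map (fun i => (PySem.Int.ofStr? i).getD 0)
  else
    find_mask (PySem.Str.replace input_mask "/" "")

-- ===== PORT B =====
def return_mask_normalized_alt (input_mask : String) : List Int :=
  if PySem.Str.isIn "." input_mask then
    (((PySem.Str.split? input_mask ".").getD [])).map (fun i => (PySem.Int.ofStr? i).getD 0)
  else
    match PySem.Int.ofStr? (PySem.Str.replace input_mask "/" "") with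
    | none => []  -- int() ValueError, excluded by Pre_
    | some c =>
      let idx := max 0 (min (PySem.Int.floordiv c 8) 3)
      -- [255]*idx + [256 - 2**(8-(c-8*idx))] + [0]*(3-idx); the exponent is ≥ 0 under Pre_
      List.replicate idx.toNat 255 ++ [256 - 2 ^ (8 - (c - 8 * idx)).toNat] ++ List.replicate (3 - idx).toNat 0

-- ===== PRECONDITION & SPEC =====
-- Pre_ excludes inputs on which int() raises ValueError, and CIDR values above 32, on which
-- A returns a list containing a float (256 - 2**negative), not a value of type List Int.
def Pre_return_mask_normalized (input_mask : String) : Prop :=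
  if PySem.Str.isIn "." input_mask then
    ∀ p ∈ ((PySem.Str.split? input_mask ".").getD []), (PySem.Int.ofStr? p).isSome = true
  else
    (PySem.Int.ofStr? (PySem.Str.replace input_mask "/" "")).isSome = true ∧
    (PySem.Int.ofStr? (PySem.Str.replace input_mask "/" "")).getD 0 ≤ 32

instance (input_mask : String) : Decidable (Pre_return_mask_normalized input_mask) := by
  unfold Pre_return_mask_normalized; infer_instance

def pvWitness_return_mask_normalized : String := "/24"

def Spec_return_mask_normalized (input_mask : String) (out : List Int) : Prop := out = return_mask_normalized_alt input_mask
instance (input_mask : String) (out : List Int) : Decidable (Spec_return_mask_normalized input_mask out) := by unfold Spec_return_mask_normalized; infer_instance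

-- ===== CLAIM (what is proved, stated in full; the proofs are below) =====
def Claim_equal_return_mask_normalized : Prop := ∀ (input_mask : String), Dom_return_mask_normalized input_mask → Pre_return_mask_normalized input_mask → Spec_return_mask_normalized input_mask (return_mask_normalized input_mask)

-- ===== LEMMAS AND PROOFS =====

-- the CIDR-branch core: A's nested if/else equals B's uniform construction for every int n ≤ 32
lemma find_mask_eq_alt (n : Int) (hn : n ≤ 32) :
    (if n < 8 then
      ((([(0 : Int), 1, 2, 3].set 0 (256 - pvPow2 (32 - (n + 24)))).set 1 0).set 2 0).set 3 0
    else if n < 16 then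
      ((([(0 : Int), 1, 2, 3].set 0 255).set 1 (256 - pvPow2 (32 - (n + 16)))).set 2 0).set 3 0
    else if n < 24 then
      ((([(0 : Int), 1, 2, 3].set 0 255).set 1 255).set 2 (256 - pvPow2 (32 - (n + 8)))).set 3 0
    else
      ((([(0 : Int), 1, 2, 3].set 0 255).set 1 255).set 2 255).set 3 (256 - pvPow2 (32 - n))) =
    (List.replicate (max 0 (min (PySem.Int.floordiv n 8) 3)).toNat 255 ++
      [256 - 2 ^ (8 - (n - 8 * max 0 (min (PySem.Int.floordiv n 8) 3))).toNat] ++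
      List.replicate (3 - max 0 (min (PySem.Int.floordiv n 8) 3)).toNat 0) := by
  have hfd : PySem.Int.floordiv n 8 = n / 8 := PySem.Int.floordiv_eq_ediv_of_pos (by omega)
  split_ifs with h1 h2 h3
  · have hidx : max 0 (min (PySem.Int.floordiv n 8) 3) = 0 := by rw [hfd]; omega
    rw [hidx]
    simp [pvPow2, List.set]
    congr 1; omega
  · have hidx : max 0 (min (PySem.Int.floordiv n 8) 3) = 1 := by rw [hfd]; omega
    rw [hidx]
    simp [pvPow2, List.set]
    congr 1; omega
  · have hidx : max 0 (min (PySem.Int.floordiv n 8) 3) = 2 := by rw [hfd]; omega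
    rw [hidx]
    simp [pvPow2, List.set]
    congr 1; omega
  · have hidx : max 0 (min (PySem.Int.floordiv n 8) 3) = 3 := by rw [hfd]; omega
    rw [hidx]
    simp [pvPow2, List.set]
    congr 1; omega

-- ===== VERDICT (by name: the statement is the Claim_ definition above) =====
theorem return_mask_normalized_spec : Claim_equal_return_mask_normalized := by
  intro s _ hpre
  unfold Spec_return_mask_normalized return_mask_normalized return_mask_normalized_alt
  unfold Pre_return_mask_normalized at hpre
  by_cases h : PySem.Str.isIn "." s = true
  · rw [if_pos h, if_pos h]
  · rw [if_neg h, if_neg h]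
    rw [if_neg h] at hpre
    obtain ⟨hsome, hle⟩ := hpre
    obtain ⟨n, heq⟩ := Option.isSome_iff_exists.mp hsome
    rw [heq] at hle ⊢
    simp only [Option.getD_some] at hle
    unfold find_mask
    rw [heq]
    have harr : ((PySem.List.pyRange 0 4 1).foldl (fun acc i => acc ++ [i]) ([] : List Int)) = [0, 1, 2, 3] := by decide
    simp only [harr]
    exact find_mask_eq_alt n hle
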